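-- pv_equiv track=rewrite | github.com/bigict/falcon2 | web/pdb_process/replace_pdb.py | return_coord
-- ===== SOURCE A (Python) =====
-- def return_coord(tmp):
--     tmp = tmp.split("\n")
--     atom_before = []
--     atom_after = []
--     action = 0
--     for i in tmp:
--         if i.startswith("ANISOU"):
--             continue
--         elif i.startswith("HETATM"):
--             continue
--         elif i.startswith("TER"):
--             continue
--         elif not i.startswith("ATOM"):
--             if action == 0:
--                 atom_before.append(i)
--             elif action == 1:
--                 atom_after.append(i)
--         elif i.startswith("ATOM"):
--             action = 1
--     return atom_before, atom_after
-- ===== SOURCE B (Python) =====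
-- def return_coord(tmp):
--     lines = tmp.split("\n")
--     first = next((i for i, l in enumerate(lines) if l.startswith("ATOM")), len(lines))
--     keep = lambda l: not l.startswith(("ANISOU", "HETATM", "TER", "ATOM"))
--     atom_before = [l for l in lines[:first] if keep(l)]
--     atom_after = [l for l in lines[first + 1:] if keep(l)]
--     return atom_before, atom_after
-- ===== Notes on version B (the rewrite author's own statement) =====
-- stated objective: simpler
-- what changed: Replaced the stateful flag-driven single loop by an explicit pivot search (index of the first ATOM line) followed by two filtered slices (before the pivot / after it).
import Mathlib
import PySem

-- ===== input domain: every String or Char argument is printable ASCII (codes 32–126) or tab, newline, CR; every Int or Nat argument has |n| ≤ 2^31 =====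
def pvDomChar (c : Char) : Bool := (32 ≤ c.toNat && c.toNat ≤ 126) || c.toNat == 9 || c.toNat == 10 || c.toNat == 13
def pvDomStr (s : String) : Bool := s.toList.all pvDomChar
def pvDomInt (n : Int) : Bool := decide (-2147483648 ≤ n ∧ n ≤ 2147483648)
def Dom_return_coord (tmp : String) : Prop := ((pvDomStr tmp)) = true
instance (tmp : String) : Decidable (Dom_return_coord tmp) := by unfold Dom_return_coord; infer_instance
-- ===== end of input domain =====

-- B replaces A's stateful flag loop by a pivot search (first ATOM line) plus two filtered slices; same cost, simpler decomposition.

-- ===== PORT A =====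
-- literal transliteration of A's flag-driven loop over the split lines
def returnCoordLoop : List String → List String → List String → Int → List String × List String
  | [], before, after, _ => (before, after)
  | i :: rest, before, after, action =>
    if PySem.Str.startswith i "ANISOU" then returnCoordLoop rest before after action
    else if PySem.Str.startswith i "HETATM" then returnCoordLoop rest before after action
    else if PySem.Str.startswith i "TER" then returnCoordLoop rest before after action
    else if !(PySem.Str.startswith i "ATOM") then
      (if action == 0 then returnCoordLoop rest (before ++ [i]) after action
       else if action == 1 then returnCoordLoop rest before (after ++ [i]) action
       else returnCoordLoop rest before after action)
    else if PySem.Str.startswith i "ATOM" then returnCoordLoop rest before after 1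
    else returnCoordLoop rest before after action

-- tmp.split("\n"): the separator is the nonempty literal "\n", so split? is always `some`; getD [] is unreachable
def return_coord (tmp : String) : List String × List String :=
  returnCoordLoop ((PySem.Str.split? tmp "\n").getD []) [] [] 0

-- ===== PORT B =====
def keepLine (l : String) : Bool :=
  !(PySem.Str.startswith l "ANISOU" || PySem.Str.startswith l "HETATM"
    || PySem.Str.startswith l "TER" || PySem.Str.startswith l "ATOM")

def return_coord_alt (tmp : String) : List String × List String :=
  let lines := (PySem.Str.split? tmp "\n").getD []
  let first := lines.findIdx (fun l => PySem.Str.startswith l "ATOM")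
  ((lines.take first).filter keepLine, (lines.drop (first + 1)).filter keepLine)

-- ===== PRECONDITION & SPEC =====
def Spec_return_coord (tmp : String) (out : List String × List String) : Prop := out = return_coord_alt tmp
instance (tmp : String) (out : List String × List String) : Decidable (Spec_return_coord tmp out) := by unfold Spec_return_coord; infer_instance

-- ===== CLAIM (what is proved, stated in full; the proofs are below) =====
def Claim_equal_return_coord : Prop := ∀ (tmp : String), Dom_return_coord tmp → Spec_return_coord tmp (return_coord tmp)

-- ===== LEMMAS AND PROOFS =====

-- a line starting with "ATOM" starts with none of the other three tags
lemma atom_disj (l : List Char) (h : PySem.Chars.startswith l ['A','T','O','M'] = true) :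
    PySem.Chars.startswith l ['A','N','I','S','O','U'] = false ∧
    PySem.Chars.startswith l ['H','E','T','A','T','M'] = false ∧
    PySem.Chars.startswith l ['T','E','R'] = false := by
  rw [PySem.Chars.startswith_iff] at h
  obtain ⟨t, rfl⟩ := h
  refine ⟨?_, ?_, ?_⟩ <;>
    (rw [Bool.eq_false_iff]
     intro hc
     rw [PySem.Chars.startswith_iff] at hc
     simp [List.cons_prefix_cons] at hc)

-- once the flag is 1, the loop appends exactly the kept lines to `after`
lemma loop1 (l : List String) (b a : List String) :
    returnCoordLoop l b a 1 = (b, a ++ l.filter keepLine) := by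
  induction l generalizing b a with
  | nil => simp [returnCoordLoop]
  | cons i rest ih =>
    by_cases h1 : PySem.Chars.startswith i.toList ['A','N','I','S','O','U'] = true
    · simp [returnCoordLoop, h1, ih, keepLine, List.filter]
    · by_cases h2 : PySem.Chars.startswith i.toList ['H','E','T','A','T','M'] = true
      · simp [returnCoordLoop, h1, h2, ih, keepLine, List.filter]
      · by_cases h3 : PySem.Chars.startswith i.toList ['T','E','R'] = true
        · simp [returnCoordLoop, h1, h2, h3, ih, keepLine, List.filter]
        · by_cases h4 : PySem.Chars.startswith i.toList ['A','T','O','M'] = true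
          · simp [returnCoordLoop, h1, h2, h3, h4, ih, keepLine, List.filter]
          · simp [returnCoordLoop, h1, h2, h3, h4, ih, keepLine, List.filter]

-- with the flag still 0, the loop realises B's pivot-and-two-slices decomposition
lemma loop0 (l : List String) (b a : List String) :
    returnCoordLoop l b a 0 =
      (b ++ (l.take (l.findIdx (fun s => PySem.Str.startswith s "ATOM"))).filter keepLine,
       a ++ (l.drop (l.findIdx (fun s => PySem.Str.startswith s "ATOM") + 1)).filter keepLine) := by
  induction l generalizing b a with
  | nil => simp [returnCoordLoop]
  | cons i rest ih =>
    by_cases h4 : PySem.Chars.startswith i.toList ['A','T','O','M'] = true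
    · obtain ⟨h1, h2, h3⟩ := atom_disj i.toList h4
      simp [returnCoordLoop, h1, h2, h3, h4, List.findIdx_cons, loop1]
    · by_cases h1 : PySem.Chars.startswith i.toList ['A','N','I','S','O','U'] = true
      · simp [returnCoordLoop, h1, ih, List.findIdx_cons, h4, keepLine]
      · by_cases h2 : PySem.Chars.startswith i.toList ['H','E','T','A','T','M'] = true
        · simp [returnCoordLoop, h1, h2, ih, List.findIdx_cons, h4, keepLine]
        · by_cases h3 : PySem.Chars.startswith i.toList ['T','E','R'] = true
          · simp [returnCoordLoop, h1, h2, h3, ih, List.findIdx_cons, h4, keepLine]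
          · simp [returnCoordLoop, h1, h2, h3, h4, ih, List.findIdx_cons, keepLine]

-- ===== VERDICT (by name: the statement is the Claim_ definition above) =====
theorem return_coord_spec : Claim_equal_return_coord := by
  intro tmp _
  unfold Spec_return_coord return_coord return_coord_alt
  simp [loop0]
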